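-- pv_equiv track=rewrite | github.com/migoVanDingo/ed-upload-worker | worker/utils.py | parse_object_key_metadata
-- ===== SOURCE A (Python) =====
-- from typing import Optional, Tuple
--
-- def parse_object_key_metadata(object_key: str) -> Tuple[Optional[str], Optional[str]]:
--     """
--     Parse datastore_id and upload_session_id from an object key like:
--
--         raw/datastore/{datastore_id}/session/{upload_session_id}/{filename}
--
--     Returns (datastore_id, upload_session_id). If a part can't be found, it
--     returns None for that piece.
--     """
--     if not object_key:
--         return None, None
--
--     parts = object_key.strip("/").split("/")
--
--     datastore_id: Optional[str] = None
--     upload_session_id: Optional[str] = None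
--
--     for i, part in enumerate(parts):
--         if part == "datastore" and i + 1 < len(parts):
--             datastore_id = parts[i + 1]
--         elif part == "session" and i + 1 < len(parts):
--             upload_session_id = parts[i + 1]
--
--     return datastore_id, upload_session_id
-- ===== SOURCE B (Python) =====
-- def parse_object_key_metadata(object_key):
--     def scan(parts):
--         # recursion on the suffix; the deeper (later) match wins, matching
--         # the original's last-occurrence-overwrites semantics
--         if len(parts) < 2:
--             return None, None
--         ds, ss = scan(parts[1:])
--         if ds is None and parts[0] == "datastore":
--             ds = parts[1]
--         if ss is None and parts[0] == "session":
--             ss = parts[1]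
--         return ds, ss
--
--     if not object_key:
--         return None, None
--     return scan(object_key.strip("/").split("/"))
-- ===== Notes on version B (the rewrite author's own statement) =====
-- stated objective: alternative
-- what changed: Replaces A's forward indexed loop that overwrites accumulators (last match wins) by structural recursion on the suffix of the split parts that combines post-recursion with a fill-if-None rule, so later occurrences win by recursion depth instead of by overwriting.
import Mathlib
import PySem

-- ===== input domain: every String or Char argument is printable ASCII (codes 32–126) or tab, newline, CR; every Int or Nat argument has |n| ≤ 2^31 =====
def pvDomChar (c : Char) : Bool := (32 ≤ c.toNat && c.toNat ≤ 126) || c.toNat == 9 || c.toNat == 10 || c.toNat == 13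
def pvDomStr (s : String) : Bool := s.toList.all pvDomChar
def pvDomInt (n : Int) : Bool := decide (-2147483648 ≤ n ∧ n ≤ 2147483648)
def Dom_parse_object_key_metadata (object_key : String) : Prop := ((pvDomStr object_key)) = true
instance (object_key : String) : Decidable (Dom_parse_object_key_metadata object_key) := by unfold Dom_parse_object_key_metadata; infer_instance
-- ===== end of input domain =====

-- B replaces A's forward overwriting index loop by structural recursion on the suffix
-- with a fill-if-none combine (later matches win by recursion depth); objective: alternative.

-- s.strip("/").split("/"); the .getD [] is unreachable (split? is none only for sep = "")
def pokParts (s : String) : List String :=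
  (PySem.Str.split? (PySem.Str.stripChars s "/") "/").getD []

-- ===== PORT A =====
-- step of A's 'for i, part in enumerate(parts)' loop (acc = (datastore_id, upload_session_id))
def pokStepA (parts : List String) (acc : Option String × Option String)
    (ip : Int × String) : Option String × Option String :=
  if ip.2 == "datastore" && decide (ip.1 + 1 < PySem.List.len parts) then
    (PySem.List.pyGet? parts (ip.1 + 1), acc.2)
  else if ip.2 == "session" && decide (ip.1 + 1 < PySem.List.len parts) then
    (acc.1, PySem.List.pyGet? parts (ip.1 + 1))
  else acc

def parse_object_key_metadata (object_key : String) : Option String × Option String :=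
  if object_key == "" then (none, none)
  else
    let parts := pokParts object_key
    (PySem.List.enumerate parts 0).foldl (pokStepA parts) (none, none)

-- ===== PORT B =====
-- Source B's inner 'scan': recursion on the tail, fill a slot only if the recursive
-- result left it None
def pokScanB : List String → Option String × Option String
  | p :: n :: rest =>
    let r := pokScanB (n :: rest)
    (if r.1.isNone && p == "datastore" then some n else r.1,
     if r.2.isNone && p == "session" then some n else r.2)
  | _ => (none, none)

def parse_object_key_metadata_alt (object_key : String) : Option String × Option String :=
  if object_key == "" then (none, none)
  else pokScanB (pokParts object_key)

-- ===== PRECONDITION & SPEC =====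
def Spec_parse_object_key_metadata (object_key : String) (out : Option String × Option String) : Prop := out = parse_object_key_metadata_alt object_key
instance (object_key : String) (out : Option String × Option String) : Decidable (Spec_parse_object_key_metadata object_key out) := by unfold Spec_parse_object_key_metadata; infer_instance

-- ===== CLAIM (what is proved, stated in full; the proofs are below) =====
def Claim_equal_parse_object_key_metadata : Prop := ∀ (object_key : String), Dom_parse_object_key_metadata object_key → Spec_parse_object_key_metadata object_key (parse_object_key_metadata object_key)

-- ===== LEMMAS AND PROOFS =====

-- the common shape A's loop reduces to: a fold over the adjacent pairs
def pokStepP (acc : Option String × Option String) (pn : String × String) :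
    Option String × Option String :=
  if pn.1 = "datastore" then (some pn.2, acc.2)
  else if pn.1 = "session" then (acc.1, some pn.2) else acc

lemma pok_foldA_eq (parts pre : List String) (s : Option String × Option String) :
    (PySem.List.enumerate parts (pre.length : Int)).foldl (pokStepA (pre ++ parts)) s
      = (parts.zip parts.tail).foldl pokStepP s := by
  induction parts generalizing pre s with
  | nil => simp [PySem.List.enumerate_nil]
  | cons p rest ih =>
    rw [PySem.List.enumerate_cons]
    have hfull : pre ++ p :: rest = (pre ++ [p]) ++ rest := by simp
    have hlen : ((pre.length : Int) + 1) = (((pre ++ [p]).length : Nat) : Int) := by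
      push_cast [List.length_append, List.length_singleton]; ring
    cases rest with
    | nil =>
      simp [PySem.List.enumerate_nil, pokStepA]
    | cons n rest' =>
      have hget : PySem.List.pyGet? (pre ++ p :: n :: rest') ((pre.length : Int) + 1)
          = some n := by
        rw [hlen, hfull]
        exact PySem.List.pyGet?_append_length (pre := pre ++ [p]) (y := n) (ys := rest')
      have hlt : ((pre.length : Int) + 1 < PySem.List.len (pre ++ p :: n :: rest')) := by
        rw [PySem.List.len_eq]; push_cast [List.length_append, List.length_singleton, List.length_cons]; omega
      have hstep : pokStepA (pre ++ p :: n :: rest') s ((pre.length : Int), p)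
          = pokStepP s (p, n) := by
        simp only [pokStepA, pokStepP, hget, hlt, decide_true, Bool.and_true]
        by_cases h1 : p = "datastore"
        · simp [h1]
        · by_cases h2 : p = "session" <;> simp [h1, h2]
      simp only [List.foldl_cons]
      rw [hstep, hlen, hfull, ih (pre ++ [p])]
      rfl

-- B's fill-if-none recursion computes the same pair as A's overwriting fold:
-- the fold's result is the scan's result, falling back to the accumulator
lemma pok_scan_eq_fold (l : List String) (acc : Option String × Option String) :
    (l.zip l.tail).foldl pokStepP acc
      = ((pokScanB l).1.or acc.1, (pokScanB l).2.or acc.2) := by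
  induction l generalizing acc with
  | nil => simp [pokScanB]
  | cons p rest ih =>
    cases rest with
    | nil => simp [pokScanB]
    | cons n rest' =>
      simp only [List.tail_cons, List.zip_cons_cons, List.foldl_cons]
      simp only [List.tail_cons] at ih
      rw [ih]
      simp only [pokScanB, pokStepP]
      cases h1 : (pokScanB (n :: rest')).1 <;> cases h2 : (pokScanB (n :: rest')).2 <;>
        by_cases hp : p = "datastore" <;> by_cases hq : p = "session" <;>
          simp_all [Option.or]

-- ===== VERDICT (by name: the statement is the Claim_ definition above) =====
theorem parse_object_key_metadata_spec : Claim_equal_parse_object_key_metadata := by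
  intro object_key _
  unfold Spec_parse_object_key_metadata parse_object_key_metadata parse_object_key_metadata_alt
  by_cases h : object_key = ""
  · simp [h]
  · simp only [beq_iff_eq, if_neg h]
    have := pok_foldA_eq (pokParts object_key) [] (none, none)
    simp only [List.length_nil, Int.ofNat_zero, List.nil_append] at this
    rw [this, pok_scan_eq_fold]
    simp
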